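-- pv_equiv track=rewrite | github.com/Julia2300/composing_music_ml | 2_tokenizing/tokenizing_functions.py | transform_to_prompt
-- ===== SOURCE A (Python) =====
-- def transform_to_prompt(words, max_bars=2):
--     """
--     Transform a list of words into a prompt, limiting the number of bars.
--
--     :param words: list of words
--     :param max_bars: maximum number of bars
--     :return: list of words as a prompt
--     """
--     prompt = []
--     bar = 0
--     for word in words:
--         if bar <= max_bars:
--             if word == "Bar_None":
--                 bar += 1
--             prompt.append(word)
--         else:
--             break
--     return prompt
-- ===== SOURCE B (Python) =====
-- def transform_to_prompt(words, max_bars=2):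
--     """
--     Transform a list of words into a prompt, limiting the number of bars.
--
--     Scan once for the positions of all "Bar_None" markers, then return a
--     single slice: everything up to and including the (max_bars+1)-th marker,
--     or the whole list if there are not that many markers.
--     """
--     k = max_bars + 1  # number of markers the prompt may contain
--     if k <= 0:
--         return []
--     positions = [i for i, w in enumerate(words) if w == "Bar_None"]
--     if len(positions) < k:
--         return list(words)
--     return list(words[:positions[k - 1] + 1])
-- ===== Notes on version B (the rewrite author's own statement) =====
-- stated objective: alternative
-- what changed: Replaces the stateful accumulate-and-break loop with a one-pass index table of 'Bar_None' positions followed by a single slice up to the (max_bars+1)-th marker.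
import Mathlib
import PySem

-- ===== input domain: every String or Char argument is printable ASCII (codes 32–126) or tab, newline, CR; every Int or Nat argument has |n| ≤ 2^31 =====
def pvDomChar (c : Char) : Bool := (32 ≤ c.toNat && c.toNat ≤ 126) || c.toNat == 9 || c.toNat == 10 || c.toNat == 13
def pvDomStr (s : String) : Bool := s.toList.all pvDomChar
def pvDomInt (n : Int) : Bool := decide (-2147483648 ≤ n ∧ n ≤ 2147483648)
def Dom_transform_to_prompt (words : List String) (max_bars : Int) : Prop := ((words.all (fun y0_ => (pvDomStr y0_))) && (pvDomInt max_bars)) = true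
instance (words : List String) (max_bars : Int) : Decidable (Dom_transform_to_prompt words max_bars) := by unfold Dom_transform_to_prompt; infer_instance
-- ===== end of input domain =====

-- B replaces A's stateful accumulate-and-break loop by a one-pass marker-position table plus a single slice (same cost, different decomposition).


-- ===== PORT A =====
-- A's for-loop with the running bar counter and the break, as structural recursion;
-- the accumulated prompt is the list built by the recursion.
def transform_to_prompt_go (max_bars : Int) : List String → Int → List String
  | [], _ => []
  | w :: ws, bar =>
    if bar ≤ max_bars then
      if w == "Bar_None" then w :: transform_to_prompt_go max_bars ws (bar + 1)
      else w :: transform_to_prompt_go max_bars ws bar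
    else []

def transform_to_prompt (words : List String) (max_bars : Int) : List String :=
  transform_to_prompt_go max_bars words 0

-- ===== PORT B =====
-- Source B: k = max_bars + 1; positions = [i for i, w in enumerate(words) if w == "Bar_None"];
-- return [] / list(words) / list(words[:positions[k-1] + 1]).
-- words[:n] with n ≥ 0 is List.take n; positions[k-1] is an in-range index, read with getD.
def transform_to_prompt_alt (words : List String) (max_bars : Int) : List String :=
  let k := max_bars + 1
  if k ≤ 0 then []
  else
    let positions := (PySem.List.enumerate words 0).filterMap
      (fun p => if p.2 == "Bar_None" then some p.1 else none)
    if (positions.length : Int) < k then words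
    else words.take ((positions.getD (k - 1).toNat 0).toNat + 1)

-- ===== PRECONDITION & SPEC =====
def Spec_transform_to_prompt (words : List String) (max_bars : Int) (out : List String) : Prop := out = transform_to_prompt_alt words max_bars
instance (words : List String) (max_bars : Int) (out : List String) : Decidable (Spec_transform_to_prompt words max_bars out) := by unfold Spec_transform_to_prompt; infer_instance

-- ===== CLAIM (what is proved, stated in full; the proofs are below) =====
def Claim_equal_transform_to_prompt : Prop := ∀ (words : List String) (max_bars : Int), Dom_transform_to_prompt words max_bars → Spec_transform_to_prompt words max_bars (transform_to_prompt words max_bars)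

-- ===== LEMMAS AND PROOFS =====

-- Common characterisation: keep words while the remaining marker budget m is positive,
-- a marker spends one unit.
def pvC (m : Int) : List String → List String
  | [] => []
  | w :: ws => if m ≤ 0 then [] else w :: pvC (if w == "Bar_None" then m - 1 else m) ws

-- B's body with the budget k abstracted (definitionally alt at k = max_bars + 1).
def pvAlt (k : Int) (words : List String) : List String :=
  if k ≤ 0 then []
  else
    let positions := (PySem.List.enumerate words 0).filterMap
      (fun p => if p.2 == "Bar_None" then some p.1 else none)
    if (positions.length : Int) < k then words
    else words.take ((positions.getD (k - 1).toNat 0).toNat + 1)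

def pvPos (words : List String) (s : Int) : List Int :=
  (PySem.List.enumerate words s).filterMap (fun p => if p.2 == "Bar_None" then some p.1 else none)

lemma pvPos_nil (s : Int) : pvPos [] s = [] := rfl

lemma pvPos_cons (w : String) (ws : List String) (s : Int) :
    pvPos (w :: ws) s = if w == "Bar_None" then s :: pvPos ws (s + 1) else pvPos ws (s + 1) := by
  by_cases hw : w = "Bar_None" <;>
    simp [pvPos, PySem.List.enumerate_cons, hw]

lemma pvPos_succ (ws : List String) (s : Int) :
    pvPos ws (s + 1) = (pvPos ws s).map (· + 1) := by
  induction ws generalizing s with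
  | nil => rfl
  | cons w ws ih =>
      rw [pvPos_cons, pvPos_cons]
      split <;> simp [ih]

lemma pvPos_nonneg (ws : List String) (s : Int) : ∀ x ∈ pvPos ws s, s ≤ x := by
  induction ws generalizing s with
  | nil => simp [pvPos_nil]
  | cons w ws ih =>
      rw [pvPos_cons]
      intro x hx
      split at hx
      · rcases List.mem_cons.mp hx with h | h
        · omega
        · have := ih (s + 1) x h; omega
      · have := ih (s + 1) x hx; omega

lemma pvAlt_def (k : Int) (words : List String) :
    pvAlt k words = if k ≤ 0 then []
      else if ((pvPos words 0).length : Int) < k then words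
      else words.take (((pvPos words 0).getD (k - 1).toNat 0).toNat + 1) := rfl

lemma pvAlt_eq_pvC (words : List String) : ∀ k : Int, pvAlt k words = pvC k words := by
  induction words with
  | nil =>
      intro k
      rw [pvAlt_def]
      show (if k ≤ 0 then [] else if ((0:Nat) : Int) < k then ([] : List String)
        else List.take ((([] : List Int).getD (k-1).toNat 0).toNat + 1) []) = pvC k []
      simp [pvC]
  | cons w ws ih =>
      intro k
      by_cases hk : k ≤ 0
      · rw [pvAlt_def]
        simp [pvC, hk]
      · have hk' : 0 < k := by omega
        have h1 : pvPos ws 1 = (pvPos ws 0).map (· + 1) := by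
          have := pvPos_succ ws 0; simpa using this
        have hpos : pvPos (w :: ws) 0 =
            if w == "Bar_None" then 0 :: (pvPos ws 0).map (· + 1) else (pvPos ws 0).map (· + 1) := by
          rw [pvPos_cons]; norm_num [h1]
        set p0 := pvPos ws 0 with hp0
        have hnn : ∀ x ∈ p0, 0 ≤ x := pvPos_nonneg ws 0
        rw [pvAlt_def, hpos, if_neg hk]
        simp only [pvC, if_neg hk]
        by_cases hw : (w == "Bar_None") = true
        · -- marker case: budget drops by one
          rw [if_pos hw, if_pos hw, ← ih (k - 1), pvAlt_def, ← hp0]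
          simp only [List.length_cons, List.length_map]
          by_cases hlt : ((p0.length + 1 : Nat) : Int) < k
          · have hlt' : (p0.length : Int) < k - 1 := by push_cast at hlt; omega
            rw [if_pos (by push_cast; push_cast at hlt; omega),
                if_neg (by omega), if_pos hlt']
          · rw [if_neg (by push_cast; push_cast at hlt; omega)]
            by_cases hk1 : k = 1
            · subst hk1
              rw [if_pos (by norm_num)]
              norm_num
            · have hk2 : 2 ≤ k := by omega
              have hlen : k - 1 ≤ (p0.length : Int) := by push_cast at hlt; omega
              rw [if_neg (by omega), if_neg (by push_cast; omega)]
              have hjr : (k - 2).toNat < p0.length := by omega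
              have hj : (k - 1).toNat = (k - 2).toNat + 1 := by omega
              have hk12 : (k - 1 - 1).toNat = (k - 2).toNat := by omega
              rw [hj, List.getD_cons_succ, hk12,
                  List.getD_eq_getElem _ _ (by simpa using hjr), List.getElem_map,
                  List.getD_eq_getElem _ _ hjr]
              have hx : 0 ≤ p0[(k - 2).toNat] := hnn _ (List.getElem_mem _)
              have htn : (p0[(k - 2).toNat] + 1).toNat = p0[(k - 2).toNat].toNat + 1 := by omega
              rw [htn, List.take_succ_cons]
        · -- non-marker case: same budget
          rw [if_neg hw, if_neg hw, ← ih k, pvAlt_def, ← hp0, if_neg hk]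
          simp only [List.length_map]
          by_cases hlt : (p0.length : Int) < k
          · rw [if_pos hlt, if_pos hlt]
          · rw [if_neg hlt, if_neg hlt]
            have hjr : (k - 1).toNat < p0.length := by omega
            rw [List.getD_eq_getElem _ _ (by simpa using hjr), List.getElem_map,
                List.getD_eq_getElem _ _ hjr]
            have hx : 0 ≤ p0[(k - 1).toNat] := hnn _ (List.getElem_mem _)
            have htn : (p0[(k - 1).toNat] + 1).toNat = p0[(k - 1).toNat].toNat + 1 := by omega
            rw [htn, List.take_succ_cons]

lemma go_eq_pvC (max_bars : Int) (words : List String) :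
    ∀ bar : Int, transform_to_prompt_go max_bars words bar = pvC (max_bars + 1 - bar) words := by
  induction words with
  | nil => intro bar; rfl
  | cons w ws ih =>
      intro bar
      by_cases hb : bar ≤ max_bars
      · by_cases hw : (w == "Bar_None") = true
        · simp only [transform_to_prompt_go, pvC, if_pos hb, if_pos hw,
            if_neg (show ¬ (max_bars + 1 - bar ≤ 0) by omega)]
          rw [ih (bar + 1)]
          have : max_bars + 1 - (bar + 1) = max_bars + 1 - bar - 1 := by omega
          rw [this]
        · simp only [transform_to_prompt_go, pvC, if_pos hb, if_neg hw,
            if_neg (show ¬ (max_bars + 1 - bar ≤ 0) by omega)]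
          rw [ih bar]
      · simp only [transform_to_prompt_go, pvC, if_neg hb,
          if_pos (show max_bars + 1 - bar ≤ 0 by omega)]

-- ===== VERDICT (by name: the statement is the Claim_ definition above) =====
theorem transform_to_prompt_spec : Claim_equal_transform_to_prompt := by
  intro words max_bars _
  show transform_to_prompt words max_bars = transform_to_prompt_alt words max_bars
  have hB : transform_to_prompt_alt words max_bars = pvAlt (max_bars + 1) words := rfl
  rw [hB, pvAlt_eq_pvC, transform_to_prompt, go_eq_pvC]
  congr 1
  omega
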